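-- pv_equiv track=rewrite | github.com/MovEaxEsp/bdeformat | pythonx/bdeutil.py | findSkippingGroups
-- ===== SOURCE A (Python) =====
-- def findNextOccurrence(line, pos, chars, direction):
--     """
--     Find the position in 'line' of the next occurrence (if 'direction' is
--     '1') or previous occurrence (if 'direction' is '-1) of any of the
--     specified 'chars' starting at the specified 'pos'.  Return -1 if none is
--     found
--     """
--
--     end = -1 if direction < 0 else len(line)
--     for i in range(pos, end, direction):
--         for c in chars:
--             if line[i] == c:
--                 return i
--
--     return -1
--
-- def findSkippingGroups(line, pos, chars, direction):
--     """
--     Find the first of the specified 'chars', searching forwards (if 'direction'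
--     is '1') or backwards (if 'direction' is '-1') from position 'pos'
--     in the specified 'line', skipping sections surrounded by (), <>, or [].
--     Return its position, or -1 if not found
--     """
--
--     toFind = ""
--     groupMap = ""
--     if direction > 0:
--         toFind = "(<[{" + chars
--         groupMap = {"(" : ")", "<" : ">", "[" : "]", "{" : "}"}
--     else:
--         toFind = ")>]}" + chars
--         groupMap = {")" : "(", ">" : "<", "]" : "[", "}" : "{"}
--
--     while True:
--         pos = findNextOccurrence(line, pos, toFind, direction)
--
--         # Can't find the character or a group character
--         if pos == -1:
--             return -1
--
--         #If we found a '>', see if it's actually '->', and shouldn't be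
--         #treated as the close of a group
--         if pos > 0 and line[pos] == '>' and line[pos-1] == '-':
--             # Skip this character.
--             pos += direction
--         elif line[pos] in chars:
--             # Found one of the characters we're looking for
--             return pos
--         else:
--             break
--
--     # We found an opening or closing character for a group.  Recursively call
--     # this function to skip over the group, and look for our character again
--     groupChar = groupMap[line[pos]]
--
--     pos += direction
--
--     pos = findSkippingGroups(line, pos, groupChar, direction)
--     if pos == -1:
--         # No corresponding group character
--         return -1
--
--     return findSkippingGroups(line, pos + direction, chars, direction)
-- ===== SOURCE B (Python) =====
-- def findSkippingGroups(line, pos, chars, direction):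
--     """
--     Single-pass iterative version: scan positions one by one, keeping an
--     explicit stack of the closing characters we expect, instead of
--     recursively re-searching each group.
--     """
--     if direction > 0:
--         opens = "(<[{"
--         partner = {"(": ")", "<": ">", "[": "]", "{": "}"}
--     else:
--         opens = ")>]}"
--         partner = {")": "(", ">": "<", "]": "[", "}": "{"}
--
--     end = -1 if direction < 0 else len(line)
--     stack = []
--     for i in range(pos, end, direction):
--         c = line[i]
--         if i > 0 and c == '>' and line[i - 1] == '-':
--             continue
--         if not stack:
--             if c in chars:
--                 return i
--             if c in opens:
--                 stack.append(partner[c])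
--         else:
--             if c == stack[-1]:
--                 stack.pop()
--             elif c in opens:
--                 stack.append(partner[c])
--     return -1
-- ===== Notes on version B (the rewrite author's own statement) =====
-- stated objective: alternative
-- what changed: Replaces A's recursion (which re-scans each bracketed group with a fresh findNextOccurrence search for that group's specific closer) by a single linear scan over the range that keeps an explicit stack of expected closing characters, popping on the matching closer and ignoring non-top closers.
-- outside the precondition, e.g. on findSkippingGroups('z()', -2, 'z', 1): A returns -1, B returns 0
import Mathlib
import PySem

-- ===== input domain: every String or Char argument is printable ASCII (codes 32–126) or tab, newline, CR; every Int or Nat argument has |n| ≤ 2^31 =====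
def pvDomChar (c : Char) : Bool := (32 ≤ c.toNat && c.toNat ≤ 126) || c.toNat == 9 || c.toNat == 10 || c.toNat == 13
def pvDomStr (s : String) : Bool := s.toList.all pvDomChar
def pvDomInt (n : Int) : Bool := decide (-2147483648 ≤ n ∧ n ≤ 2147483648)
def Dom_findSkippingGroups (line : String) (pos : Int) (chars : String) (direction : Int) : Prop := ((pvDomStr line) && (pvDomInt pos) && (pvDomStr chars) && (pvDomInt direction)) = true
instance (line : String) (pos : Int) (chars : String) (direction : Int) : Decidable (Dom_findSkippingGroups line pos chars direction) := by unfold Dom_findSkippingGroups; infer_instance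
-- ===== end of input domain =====

-- B replaces A's recursive group-skipping (which re-searches each group for its own closer) by a single
-- linear scan with an explicit stack of expected closing characters (objective: alternative decomposition).

-- ===== PORT A =====
-- helper findNextOccurrence: the range(pos, end, direction) loop is reified as the list of visited
-- indices (PySem.List.pyRange) and scanned left to right.
def fsgOpens (d : Int) : List Char := if 0 < d then ['(', '<', '[', '{'] else [')', '>', ']', '}']

def fsgPartner (d : Int) (c : Char) : Char :=
  if 0 < d then
    if c == '(' then ')' else if c == '<' then '>' else if c == '[' then ']' else '}'
  else
    if c == ')' then '(' else if c == '>' then '<' else if c == ']' then '[' else '{'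

def fsgHit (line tf : List Char) (i : Int) : Bool :=
  match PySem.List.pyGet? line i with
  | some c => tf.contains c
  | none => false   -- Python raises IndexError here; unreachable under Pre_

-- findNextOccurrence's scan: first visited index whose character is in tf, with the rest of the range
def fsgFind (line tf : List Char) : List Int → Option (Int × List Int)
  | [] => none
  | i :: rest => if fsgHit line tf i then some (i, rest) else fsgFind line tf rest

def fsgArrow (line : List Char) (i : Int) : Bool :=
  decide (0 < i) && (PySem.List.pyGet? line i == some '>') && (PySem.List.pyGet? line (i - 1) == some '-')

-- the body of A's findSkippingGroups (while-loop plus the two recursive calls); fuel only pays for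
-- termination: every recursive call consumes at least one index, and the entry supplies enough fuel
def aCore (line : List Char) (d : Int) : Nat → List Char → List Int → Option (Int × List Int)
  | 0, _, _ => none
  | fuel + 1, chars, idxs =>
    match fsgFind line (fsgOpens d ++ chars) idxs with
    | none => none
    | some (p, rest) =>
      if p = -1 then none   -- Python's `if pos == -1: return -1`
      else if fsgArrow line p then aCore line d fuel chars rest   -- `pos += direction` and loop
      else if chars.contains ((PySem.List.pyGet? line p).getD ' ') then some (p, rest)
      else
        match aCore line d fuel [fsgPartner d ((PySem.List.pyGet? line p).getD ' ')] rest with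
        | none => none
        | some (_, r1) => aCore line d fuel chars r1

def findSkippingGroups (line : String) (pos : Int) (chars : String) (direction : Int) : Int :=
  let endv : Int := if direction < 0 then -1 else PySem.Str.len line
  let idxs := PySem.List.pyRange pos endv direction
  match aCore line.toList direction (idxs.length + 1) chars.toList idxs with
  | none => -1
  | some (p, _) => p

-- ===== PORT B =====
-- (B uses the same open-set and partner map as A; fsgOpens/fsgPartner are shared helpers)
-- Source B's single for-loop over range(pos, end, direction) with the explicit stack
def bCore (line chars opens : List Char) (pt : Char → Char) : List Char → List Int → Int
  | _, [] => -1
  | stack, i :: rest =>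
    match PySem.List.pyGet? line i with
    | none => bCore line chars opens pt stack rest   -- Python raises IndexError; unreachable under Pre_
    | some c =>
      if decide (0 < i) && (c == '>') && (PySem.List.pyGet? line (i - 1) == some '-') then
        bCore line chars opens pt stack rest
      else
        match stack with
        | [] =>
          if chars.contains c then i
          else if opens.contains c then bCore line chars opens pt [pt c] rest
          else bCore line chars opens pt [] rest
        | t :: s =>
          if c == t then bCore line chars opens pt s rest
          else if opens.contains c then bCore line chars opens pt (pt c :: t :: s) rest
          else bCore line chars opens pt (t :: s) rest

def findSkippingGroups_alt (line : String) (pos : Int) (chars : String) (direction : Int) : Int :=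
  let endv : Int := if direction < 0 then -1 else PySem.Str.len line
  bCore line.toList chars.toList (fsgOpens direction) (fsgPartner direction) []
    (PySem.List.pyRange pos endv direction)

-- ===== PRECONDITION & SPEC =====
-- Pre_ excludes: direction = 0 (A raises ValueError), a backward start ≥ len(line) and a forward start
-- < -len(line) (A raises IndexError), and the forward negative starts whose scan visits index -1: there
-- a result of -1 cannot distinguish "not found" from "found at negative index -1", so no caller could
-- rely on either reading; A stops with -1 at that point, B keeps scanning the remaining positions.
def Pre_findSkippingGroups (line : String) (pos : Int) (chars : String) (direction : Int) : Prop :=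
  direction ≠ 0 ∧
    (0 < direction → -(PySem.Str.len line) ≤ pos ∧ (pos < 0 → ¬ direction ∣ (-1 - pos))) ∧
    (direction < 0 → pos < PySem.Str.len line)
instance (line : String) (pos : Int) (chars : String) (direction : Int) : Decidable (Pre_findSkippingGroups line pos chars direction) := by unfold Pre_findSkippingGroups; infer_instance

def pvWitness_findSkippingGroups : String × Int × String × Int := ("a(b)c", 0, "c", 1)

def Spec_findSkippingGroups (line : String) (pos : Int) (chars : String) (direction : Int) (out : Int) : Prop := out = findSkippingGroups_alt line pos chars direction
instance (line : String) (pos : Int) (chars : String) (direction : Int) (out : Int) : Decidable (Spec_findSkippingGroups line pos chars direction out) := by unfold Spec_findSkippingGroups; infer_instance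

-- ===== CLAIM (what is proved, stated in full; the proofs are below) =====
def Claim_equal_findSkippingGroups : Prop := ∀ (line : String) (pos : Int) (chars : String) (direction : Int), Dom_findSkippingGroups line pos chars direction → Pre_findSkippingGroups line pos chars direction → Spec_findSkippingGroups line pos chars direction (findSkippingGroups line pos chars direction)

-- ===== LEMMAS AND PROOFS =====

lemma fsgFind_length (line tf : List Char) :
    ∀ (idxs : List Int) (p : Int) (r : List Int),
      fsgFind line tf idxs = some (p, r) → r.length < idxs.length := by
  intro idxs
  induction idxs with
  | nil => simp [fsgFind]
  | cons i rest ih =>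
    intro p r h
    simp only [fsgFind] at h
    split at h
    · cases h; simp
    · have := ih p r h
      simp only [List.length_cons]
      omega

lemma aCore_suffix (line : List Char) (d : Int) :
    ∀ (fuel : Nat) (chars : List Char) (idxs : List Int) (p : Int) (r : List Int),
      aCore line d fuel chars idxs = some (p, r) → r.length < idxs.length := by
  intro fuel
  induction fuel with
  | zero => intro chars idxs p r h; simp [aCore] at h
  | succ n ih =>
    intro chars idxs p r h
    simp only [aCore] at h
    cases hf : fsgFind line (fsgOpens d ++ chars) idxs with
    | none => rw [hf] at h; simp at h
    | some pr =>
      obtain ⟨p0, rest0⟩ := pr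
      have hrest0 := fsgFind_length line _ idxs p0 rest0 hf
      rw [hf] at h
      dsimp only at h
      by_cases hp : p0 = -1
      · simp [hp] at h
      · rw [if_neg hp] at h
        by_cases har : fsgArrow line p0
        · rw [if_pos har] at h
          have := ih chars rest0 p r h
          omega
        · rw [if_neg har] at h
          by_cases hco : chars.contains ((PySem.List.pyGet? line p0).getD ' ')
          · rw [if_pos hco] at h
            cases h; omega
          · rw [if_neg hco] at h
            cases hg : aCore line d n [fsgPartner d ((PySem.List.pyGet? line p0).getD ' ')] rest0 with
            | none => rw [hg] at h; simp at h
            | some qr =>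
              obtain ⟨q, r1⟩ := qr
              rw [hg] at h
              have h1 := ih _ rest0 q r1 hg
              have h2 := ih chars r1 p r h
              omega

lemma aCore_fuel (line : List Char) (d : Int) :
    ∀ (fuel fuel' : Nat) (chars : List Char) (idxs : List Int),
      idxs.length < fuel → idxs.length < fuel' →
      aCore line d fuel chars idxs = aCore line d fuel' chars idxs := by
  intro fuel
  induction fuel with
  | zero => intro fuel' chars idxs h; exact absurd h (by omega)
  | succ n ih =>
    intro fuel' chars idxs h h'
    obtain ⟨m, rfl⟩ : ∃ m, fuel' = m + 1 := ⟨fuel' - 1, by omega⟩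
    simp only [aCore]
    cases hf : fsgFind line (fsgOpens d ++ chars) idxs with
    | none => rfl
    | some pr =>
      obtain ⟨p, rest⟩ := pr
      have hrest := fsgFind_length line _ idxs p rest hf
      dsimp only
      by_cases hp : p = -1
      · simp [hp]
      · rw [if_neg hp, if_neg hp]
        by_cases har : fsgArrow line p
        · rw [if_pos har, if_pos har]
          exact ih m chars rest (by omega) (by omega)
        · rw [if_neg har, if_neg har]
          by_cases hco : chars.contains ((PySem.List.pyGet? line p).getD ' ')
          · rw [if_pos hco, if_pos hco]
          · rw [if_neg hco, if_neg hco]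
            rw [ih m _ rest (by omega) (by omega)]
            cases hg : aCore line d m [fsgPartner d ((PySem.List.pyGet? line p).getD ' ')] rest with
            | none => rfl
            | some qr =>
              obtain ⟨q, r1⟩ := qr
              have h1 := aCore_suffix line d m _ rest q r1 hg
              exact ih m chars r1 (by omega) (by omega)

-- aCore with the canonical fuel
def runA (line : List Char) (d : Int) (chars : List Char) (idxs : List Int) : Option (Int × List Int) :=
  aCore line d (idxs.length + 1) chars idxs

lemma runA_nil (line : List Char) (d : Int) (chars : List Char) : runA line d chars [] = none := by
  simp [runA, aCore, fsgFind]

lemma runA_suffix (line : List Char) (d : Int) (chars : List Char) (idxs : List Int)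
    (p : Int) (r : List Int) (h : runA line d chars idxs = some (p, r)) : r.length < idxs.length :=
  aCore_suffix line d _ chars idxs p r h

lemma runA_cons (line : List Char) (d : Int) (chars : List Char) (i : Int) (rest : List Int) :
    runA line d chars (i :: rest) =
      if fsgHit line (fsgOpens d ++ chars) i then
        if i = -1 then none
        else if fsgArrow line i then runA line d chars rest
        else if chars.contains ((PySem.List.pyGet? line i).getD ' ') then some (i, rest)
        else match runA line d [fsgPartner d ((PySem.List.pyGet? line i).getD ' ')] rest with
          | none => none
          | some (_, r1) => runA line d chars r1
      else runA line d chars rest := by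
  by_cases hh : fsgHit line (fsgOpens d ++ chars) i
  · rw [if_pos hh]
    show aCore line d (rest.length + 1 + 1) chars (i :: rest) = _
    rw [aCore]
    rw [show fsgFind line (fsgOpens d ++ chars) (i :: rest) = some (i, rest) by
      simp [fsgFind, hh]]
    dsimp only
    by_cases hp : i = -1
    · simp [hp]
    · rw [if_neg hp, if_neg hp]
      by_cases har : fsgArrow line i
      · rw [if_pos har, if_pos har]; rfl
      · rw [if_neg har, if_neg har]
        by_cases hco : chars.contains ((PySem.List.pyGet? line i).getD ' ')
        · rw [if_pos hco, if_pos hco]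
        · rw [if_neg hco, if_neg hco]
          show _ = (match runA line d _ rest with
            | none => none
            | some (_, r1) => runA line d chars r1)
          cases hg : runA line d [fsgPartner d ((PySem.List.pyGet? line i).getD ' ')] rest with
          | none => rw [show aCore line d (rest.length + 1) [fsgPartner d ((PySem.List.pyGet? line i).getD ' ')] rest = none from hg]
          | some qr =>
            obtain ⟨q, r1⟩ := qr
            rw [show aCore line d (rest.length + 1) [fsgPartner d ((PySem.List.pyGet? line i).getD ' ')] rest = some (q, r1) from hg]
            have h1 := runA_suffix line d _ rest q r1 hg
            exact aCore_fuel line d _ _ chars r1 (by omega) (by omega)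
  · rw [if_neg hh]
    have step : aCore line d (rest.length + 1 + 1) chars (i :: rest)
        = aCore line d (rest.length + 1 + 1) chars rest := by
      conv_lhs => rw [aCore]
      conv_rhs => rw [aCore]
      rw [show fsgFind line (fsgOpens d ++ chars) (i :: rest)
            = fsgFind line (fsgOpens d ++ chars) rest by simp [fsgFind, hh]]
    show aCore line d (rest.length + 1 + 1) chars (i :: rest) = runA line d chars rest
    rw [step]
    exact aCore_fuel line d _ _ chars rest (by omega) (by omega)

-- the A-side meaning of B's stack: run A's search once per pending group, innermost first
def chainA (line : List Char) (d : Int) (chars : List Char) : List Char → List Int → Int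
  | [], idxs =>
    match runA line d chars idxs with
    | none => -1
    | some (p, _) => p
  | t :: s, idxs =>
    match runA line d [t] idxs with
    | none => -1
    | some (_, r) => chainA line d chars s r

lemma chainA_nil_idx (line : List Char) (d : Int) (chars : List Char) (stack : List Char) :
    chainA line d chars stack [] = -1 := by
  cases stack <;> simp [chainA, runA_nil]

lemma bCore_eq_chainA (line chars : List Char) (d : Int) :
    ∀ idxs : List Int, (∀ j ∈ idxs, j ≠ -1) → ∀ stack : List Char,
      bCore line chars (fsgOpens d) (fsgPartner d) stack idxs = chainA line d chars stack idxs := by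
  intro idxs
  induction idxs with
  | nil => intro _ stack; rw [chainA_nil_idx]; cases stack <;> rfl
  | cons i rest ih =>
    intro hpos stack
    have hne : ¬ (i = -1) := hpos i (List.mem_cons_self)
    have hrest : ∀ j ∈ rest, j ≠ -1 := fun j hj => hpos j (List.mem_cons_of_mem _ hj)
    cases hc : PySem.List.pyGet? line i with
    | none =>
      have hmiss : ∀ tf : List Char, fsgHit line tf i = false := by
        intro tf; simp [fsgHit, hc]
      rw [show bCore line chars (fsgOpens d) (fsgPartner d) stack (i :: rest)
            = bCore line chars (fsgOpens d) (fsgPartner d) stack rest by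
        simp [bCore, hc]]
      rw [ih hrest stack]
      cases stack with
      | nil => simp [chainA, runA_cons, hmiss]
      | cons t s => simp [chainA, runA_cons, hmiss]
    | some c =>
      have hgetD : (PySem.List.pyGet? line i).getD ' ' = c := by rw [hc]; rfl
      have harr : (decide (0 < i) && (c == '>') && (PySem.List.pyGet? line (i - 1) == some '-'))
          = fsgArrow line i := by
        simp [fsgArrow, hc]
      by_cases ha : fsgArrow line i = true
      · -- '->' skip: both sides move on unchanged
        rw [show bCore line chars (fsgOpens d) (fsgPartner d) stack (i :: rest)
              = bCore line chars (fsgOpens d) (fsgPartner d) stack rest by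
          simp [bCore, hc, harr, ha]]
        rw [ih hrest stack]
        cases stack with
        | nil =>
          by_cases hh : fsgHit line (fsgOpens d ++ chars) i
          · simp [chainA, runA_cons, hh, ha, hne]
          · simp [chainA, runA_cons, hh]
        | cons t s =>
          by_cases hh : fsgHit line (fsgOpens d ++ [t]) i
          · simp [chainA, runA_cons, hh, ha, hne]
          · simp [chainA, runA_cons, hh]
      · rw [Bool.not_eq_true] at ha
        cases stack with
        | nil =>
          by_cases h1 : c ∈ chars
          · -- target found
            have hh : fsgHit line (fsgOpens d ++ chars) i = true := by
              simp [fsgHit, hc]; exact Or.inr h1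
            rw [show bCore line chars (fsgOpens d) (fsgPartner d) [] (i :: rest) = i by
              simp [bCore, hc, harr, ha, h1]]
            simp [chainA, runA_cons, hh, ha, hne, hgetD, h1]
          · by_cases h2 : c ∈ fsgOpens d
            · -- open a group: push its partner
              have hh : fsgHit line (fsgOpens d ++ chars) i = true := by
                simp [fsgHit, hc]; exact Or.inl h2
              rw [show bCore line chars (fsgOpens d) (fsgPartner d) [] (i :: rest)
                    = bCore line chars (fsgOpens d) (fsgPartner d) [fsgPartner d c] rest by
                simp [bCore, hc, harr, ha, h1, h2]]
              rw [ih hrest [fsgPartner d c]]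
              have hcc : chars.contains c = false := by simpa using h1
              simp only [chainA, runA_cons, hh, if_true, hne, ha, hgetD, hcc,
                Bool.false_eq_true, if_false, ]
              cases hg : runA line d [fsgPartner d c] rest with
              | none => rfl
              | some qr => obtain ⟨q, r1⟩ := qr; rfl
            · -- a closer with empty stack: ignored by both
              have hh : fsgHit line (fsgOpens d ++ chars) i = false := by
                simp [fsgHit, hc]; exact ⟨h2, h1⟩
              rw [show bCore line chars (fsgOpens d) (fsgPartner d) [] (i :: rest)
                    = bCore line chars (fsgOpens d) (fsgPartner d) [] rest by
                simp [bCore, hc, harr, ha, h1, h2]]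
              rw [ih hrest []]
              simp [chainA, runA_cons, hh]
        | cons t s =>
          by_cases h1 : c = t
          · -- closes the innermost group: pop
            subst h1
            have hh : fsgHit line (fsgOpens d ++ [c]) i = true := by
              simp [fsgHit, hc]
            rw [show bCore line chars (fsgOpens d) (fsgPartner d) (c :: s) (i :: rest)
                  = bCore line chars (fsgOpens d) (fsgPartner d) s rest by
              simp [bCore, hc, harr, ha]]
            rw [ih hrest s]
            simp [chainA, runA_cons, hh, ha, hne, hgetD]
          · by_cases h2 : c ∈ fsgOpens d
            · -- nested open: push
              have hh : fsgHit line (fsgOpens d ++ [t]) i = true := by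
                simp [fsgHit, hc]; exact Or.inl h2
              rw [show bCore line chars (fsgOpens d) (fsgPartner d) (t :: s) (i :: rest)
                    = bCore line chars (fsgOpens d) (fsgPartner d) (fsgPartner d c :: t :: s) rest by
                simp [bCore, hc, harr, ha, h1, h2]]
              rw [ih hrest (fsgPartner d c :: t :: s)]
              have hct : ([t].contains c) = false := by simpa using fun h => h1 h
              simp only [chainA, runA_cons, hh, if_true, hne, ha, hgetD, hct,
                Bool.false_eq_true, if_false, ]
              cases hg : runA line d [fsgPartner d c] rest with
              | none => rfl
              | some qr => obtain ⟨q, r1⟩ := qr; rfl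
            · -- irrelevant character: ignored by both
              have hh : fsgHit line (fsgOpens d ++ [t]) i = false := by
                simp [fsgHit, hc]; exact ⟨h2, h1⟩
              rw [show bCore line chars (fsgOpens d) (fsgPartner d) (t :: s) (i :: rest)
                    = bCore line chars (fsgOpens d) (fsgPartner d) (t :: s) rest by
                simp [bCore, hc, harr, ha, h1, h2]]
              rw [ih hrest (t :: s)]
              simp [chainA, runA_cons, hh]

-- every index visited under Pre_ is nonnegative
lemma pyRange_down_nonneg (pos s : Int) (hs : s < 0) :
    ∀ j ∈ PySem.List.pyRange pos (-1) s, (0:Int) ≤ j := by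
  intro j hj
  have hs0 : ¬ (s = 0) := by omega
  have hs1 : ¬ (0 < s) := by omega
  simp only [PySem.List.pyRange, hs0, if_false, hs1, List.mem_map, List.mem_range] at hj
  obtain ⟨k, hk, rfl⟩ := hj
  by_cases hp : (-1:Int) < pos
  · rw [if_pos hp] at hk
    have hcount : pos - -1 + -s - 1 = pos + -s := by ring
    rw [hcount] at hk
    have hdiv : (pos + -s) / -s = pos / -s + 1 := by
      have h := Int.add_mul_ediv_right pos 1 (show (-s) ≠ 0 by omega)
      simpa using h
    have hkI : (k : Int) ≤ pos / -s := by omega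
    have h3 : (-s) * (k:Int) ≤ (-s) * (pos / -s) :=
      mul_le_mul_of_nonneg_left hkI (by omega)
    have h4 : (-s) * (pos / -s) ≤ pos := by
      have h5 := Int.emod_nonneg pos (show (-s) ≠ 0 by omega)
      have h6 := Int.mul_ediv_add_emod pos (-s)
      omega
    have h7 : pos + s * (k:Int) = pos - (-s) * (k:Int) := by ring
    linarith
  · rw [if_neg hp] at hk
    exact absurd hk (by omega)

-- ===== VERDICT (by name: the statement is the Claim_ definition above) =====
theorem findSkippingGroups_spec : Claim_equal_findSkippingGroups := by
  intro line pos chars direction hdom hpre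
  obtain ⟨hd0, hdp, hdn⟩ := hpre
  unfold Spec_findSkippingGroups
  have hpos : ∀ j ∈ PySem.List.pyRange pos
      (if direction < 0 then -1 else PySem.Str.len line) direction, j ≠ -1 := by
    rcases lt_or_ge 0 direction with hdpos | hdle
    · intro j hj
      rw [if_neg (by omega : ¬ direction < 0)] at hj
      rw [PySem.List.mem_pyRange_iff_of_pos hdpos] at hj
      obtain ⟨hle, _, hdvd⟩ := hj
      obtain ⟨_, hnd⟩ := hdp hdpos
      intro hj1
      rcases lt_or_ge pos 0 with hneg | hnn
      · exact hnd hneg (by rw [hj1] at hdvd; simpa using hdvd)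
      · omega
    · have hneg : direction < 0 := by omega
      rw [if_pos hneg]
      intro j hj
      have := pyRange_down_nonneg pos direction hneg j hj
      omega
  show (match runA line.toList direction chars.toList
          (PySem.List.pyRange pos (if direction < 0 then -1 else PySem.Str.len line) direction) with
        | none => -1
        | some (p, _) => p)
      = bCore line.toList chars.toList (fsgOpens direction) (fsgPartner direction) []
          (PySem.List.pyRange pos (if direction < 0 then -1 else PySem.Str.len line) direction)
  rw [bCore_eq_chainA line.toList chars.toList direction _ hpos []]
  rfl
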